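-- pv_equiv track=rewrite | github.com/douglashiga/AgentOrchestratorLayer | domains/finance/config.py | filter_by_focus_exchange
-- ===== SOURCE A (Python) =====
-- FOCUS_EXCHANGES = ["SA", "ST", "US"]
--
-- def is_exchange_in_focus(exchange: str) -> bool:
--     """Check if an exchange is in the focus list."""
--     return exchange.upper() in FOCUS_EXCHANGES
--
-- def filter_by_focus_exchange(symbols: list[dict]) -> list[dict]:
--     """
--     Filter symbol list to prioritize focus exchanges.
--
--     Moves symbols from focus exchanges to the front of the list.
--
--     Args:
--         symbols: List of symbol dicts with 'exchange' key
--
--     Returns: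
--         Reordered list with focus exchange symbols first
--     """
--     focus_symbols = []
--     other_symbols = []
--
--     for symbol in symbols:
--         exchange = (symbol.get("exchange") or "").upper()
--         if is_exchange_in_focus(exchange):
--             focus_symbols.append(symbol)
--         else:
--             other_symbols.append(symbol)
--
--     return focus_symbols + other_symbols
-- ===== SOURCE B (Python) =====
-- FOCUS_EXCHANGES = ["SA", "ST", "US"]
--
-- def is_exchange_in_focus(exchange: str) -> bool:
--     return exchange.upper() in FOCUS_EXCHANGES
--
-- def filter_by_focus_exchange(symbols: list[dict]) -> list[dict]:
--     return sorted(symbols,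
--                   key=lambda s: 0 if is_exchange_in_focus((s.get("exchange") or "").upper()) else 1)
-- ===== Notes on version B (the rewrite author's own statement) =====
-- stated objective: idiomatic
-- what changed: Replaces the two-accumulator partition loop and concatenation with a single stable sort keyed 0/1 on focus-exchange membership; stability preserves the relative order inside each group.
import Mathlib
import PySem

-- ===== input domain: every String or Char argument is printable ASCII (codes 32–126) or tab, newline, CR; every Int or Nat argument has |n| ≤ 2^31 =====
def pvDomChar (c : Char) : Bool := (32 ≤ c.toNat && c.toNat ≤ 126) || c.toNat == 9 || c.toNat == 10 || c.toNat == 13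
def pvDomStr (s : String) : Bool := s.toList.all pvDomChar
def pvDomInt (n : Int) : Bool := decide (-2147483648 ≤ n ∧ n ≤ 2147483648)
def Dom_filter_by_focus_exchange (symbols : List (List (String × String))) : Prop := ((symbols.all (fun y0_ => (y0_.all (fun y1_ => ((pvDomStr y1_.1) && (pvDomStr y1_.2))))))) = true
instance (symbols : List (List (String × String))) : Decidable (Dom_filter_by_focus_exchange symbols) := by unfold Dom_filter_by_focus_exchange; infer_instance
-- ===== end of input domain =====

-- B replaces A's two-accumulator partition loop with one stable sort keyed 0/1 (idiomatic); return value only, no mutation.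

-- ===== PORT A =====
def FOCUS_EXCHANGES : List String := ["SA", "ST", "US"]

def is_exchange_in_focus (exchange : String) : Bool :=
  FOCUS_EXCHANGES.contains (PySem.Str.upper exchange)

def filter_by_focus_exchange (symbols : List (List (String × String))) : List (List (String × String)) :=
  let acc := symbols.foldl
    (fun (acc : List (List (String × String)) × List (List (String × String))) symbol =>
      let exchange := PySem.Str.upper (((PySem.Dict.mk symbol).get? "exchange").getD "")
      if is_exchange_in_focus exchange then
        (acc.1 ++ [symbol], acc.2)
      else
        (acc.1, acc.2 ++ [symbol]))
    ([], [])
  acc.1 ++ acc.2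

-- ===== PORT B =====
-- key=lambda s: 0 if is_exchange_in_focus((s.get("exchange") or "").upper()) else 1
def symKey (s : List (String × String)) : Int :=
  if is_exchange_in_focus (PySem.Str.upper (((PySem.Dict.mk s).get? "exchange").getD "")) then 0 else 1

def filter_by_focus_exchange_alt (symbols : List (List (String × String))) : List (List (String × String)) :=
  PySem.List.sorted symbols symKey

-- ===== PRECONDITION & SPEC =====
def Spec_filter_by_focus_exchange (symbols : List (List (String × String))) (out : List (List (String × String))) : Prop := out = filter_by_focus_exchange_alt symbols
instance (symbols : List (List (String × String))) (out : List (List (String × String))) : Decidable (Spec_filter_by_focus_exchange symbols out) := by unfold Spec_filter_by_focus_exchange; infer_instance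

-- ===== CLAIM (what is proved, stated in full; the proofs are below) =====
def Claim_equal_filter_by_focus_exchange : Prop := ∀ (symbols : List (List (String × String))), Dom_filter_by_focus_exchange symbols → Spec_filter_by_focus_exchange symbols (filter_by_focus_exchange symbols)

-- ===== LEMMAS AND PROOFS =====

-- the boolean predicate both programs test
def pfoc (s : List (String × String)) : Bool :=
  is_exchange_in_focus (PySem.Str.upper (((PySem.Dict.mk s).get? "exchange").getD ""))

theorem symKey_eq (s : List (String × String)) : symKey s = if pfoc s then 0 else 1 := rfl

theorem insertBy_cons {α : Type} (before : α → α → Bool) (x y : α) (ys : List α) :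
    PySem.List.insertBy before x (y :: ys) =
      if before x y then x :: y :: ys else y :: PySem.List.insertBy before x ys := rfl

theorem key_lt (a b : List (String × String)) :
    (decide (symKey a < symKey b)) = (pfoc a && !pfoc b) := by
  rw [symKey_eq, symKey_eq]
  by_cases ha : pfoc a <;> by_cases hb : pfoc b <;> simp [ha, hb]

-- inserting into F ++ O, where F holds the focus block and O the rest, lands at the border or at the end
theorem insertBy_two_valued (x : List (String × String))
    (F O : List (List (String × String)))
    (hF : ∀ y ∈ F, pfoc y = true) (hO : ∀ y ∈ O, pfoc y = false) :
    PySem.List.insertBy (fun a b => decide (symKey a < symKey b)) x (F ++ O) =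
      if pfoc x then (F ++ [x]) ++ O else F ++ (O ++ [x]) := by
  induction F with
  | nil =>
    simp only [List.nil_append]
    induction O with
    | nil =>
      by_cases h : pfoc x <;> simp [PySem.List.insertBy, h]
    | cons o os ih =>
      have ho : pfoc o = false := hO o (by simp)
      have ih' := ih (fun y hy => hO y (List.mem_cons_of_mem _ hy))
      rw [insertBy_cons, key_lt, ho]
      by_cases h : pfoc x
      · simp [h]
      · simp only [h] at ih' ⊢
        simp [ih', h]
  | cons f fs ih =>
    have hf : pfoc f = true := hF f (by simp)
    have ih' := ih (fun y hy => hF y (List.mem_cons_of_mem _ hy))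
    rw [List.cons_append, insertBy_cons, key_lt, hf]
    by_cases h : pfoc x <;> simp [h] at ih' ⊢ <;> rw [ih']

-- the insertion-sort fold keeps the accumulator partitioned: focus block then other block
theorem foldl_insertBy_partition (xs : List (List (String × String)))
    (F O : List (List (String × String)))
    (hF : ∀ y ∈ F, pfoc y = true) (hO : ∀ y ∈ O, pfoc y = false) :
    xs.foldl (fun acc x => PySem.List.insertBy (fun a b => decide (symKey a < symKey b)) x acc) (F ++ O) =
      (F ++ xs.filter pfoc) ++ (O ++ xs.filter (fun s => !pfoc s)) := by
  induction xs generalizing F O with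
  | nil => simp
  | cons x xs ih =>
    simp only [List.foldl_cons]
    rw [insertBy_two_valued x F O hF hO]
    by_cases h : pfoc x
    · rw [if_pos h,
        ih (F ++ [x]) O (by
          intro y hy
          rw [List.mem_append] at hy
          cases hy with
          | inl h' => exact hF y h'
          | inr h' => simp at h'; subst h'; exact h) hO]
      simp [List.filter_cons, h]
    · rw [if_neg (by simp [h]),
        ih F (O ++ [x]) hF (by
          intro y hy
          rw [List.mem_append] at hy
          cases hy with
          | inl h' => exact hO y h'
          | inr h' => simp at h'; subst h'; simpa using h)]
      simp [List.filter_cons, h]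

-- A's two-accumulator loop is the same partition
theorem foldlA_partition (xs : List (List (String × String)))
    (F O : List (List (String × String))) :
    xs.foldl
      (fun (acc : List (List (String × String)) × List (List (String × String))) symbol =>
        let exchange := PySem.Str.upper (((PySem.Dict.mk symbol).get? "exchange").getD "")
        if is_exchange_in_focus exchange then
          (acc.1 ++ [symbol], acc.2)
        else
          (acc.1, acc.2 ++ [symbol])) (F, O) =
      (F ++ xs.filter pfoc, O ++ xs.filter (fun s => !pfoc s)) := by
  induction xs generalizing F O with
  | nil => simp
  | cons x xs ih =>
    simp only [List.foldl_cons]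
    by_cases h : pfoc x
    · rw [if_pos (by simpa [pfoc] using h)]
      rw [ih]
      simp [List.filter_cons, h]
    · rw [if_neg (by simpa [pfoc] using h)]
      rw [ih]
      simp [List.filter_cons, h]

-- ===== VERDICT (by name: the statement is the Claim_ definition above) =====
theorem filter_by_focus_exchange_spec : Claim_equal_filter_by_focus_exchange := by
  intro symbols _
  unfold Spec_filter_by_focus_exchange filter_by_focus_exchange filter_by_focus_exchange_alt
  rw [PySem.List.sorted_eq_foldl_insertBy]
  have hB := foldl_insertBy_partition symbols [] [] (by simp) (by simp)
  simp only [List.nil_append] at hB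
  have hA := foldlA_partition symbols [] []
  simp only [List.nil_append] at hA
  simp only [hA, hB]
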